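-- pv_equiv track=rewrite | github.com/levilucio/SyVOLT | pruner/pruner_helper.py | subtract_dicts
-- ===== SOURCE A (Python) =====
-- def subtract_dicts(d1, d2):
--     for key, values in d2.items():
--         if key not in d1:
--             continue
--
--         for val in values:
--             try:
--                 d1[key].remove(val)
--             except ValueError:
--                 pass
--     d1 = {k:v for k, v in d1.items() if v }
--     return d1
-- ===== SOURCE B (Python) =====
-- def subtract_dicts(d1, d2):
--     # Counter-based one-pass rebuild: O(n+m) per key instead of repeated list.remove scans.
--     # Unlike A, does not mutate d1's lists in place; the RETURN value is identical.
--     result = {}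
--     for key, lst in d1.items():
--         need = {}
--         for v in d2.get(key, []):
--             need[v] = need.get(v, 0) + 1
--         kept = []
--         for x in lst:
--             if need.get(x, 0) > 0:
--                 need[x] = need[x] - 1
--             else:
--                 kept.append(x)
--         if kept:
--             result[key] = kept
--     return result
-- ===== Notes on version B (the rewrite author's own statement) =====
-- stated objective: faster
-- what changed: Instead of calling list.remove (a linear scan) once per value of d2, B counts the needed removals per key in a dict and rebuilds each list in one pass, skipping the leftmost occurrences; the result dict is built directly instead of filtering a mutated d1 (B also does not mutate d1's lists, only the return value is claimed equal).
import Mathlib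
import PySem

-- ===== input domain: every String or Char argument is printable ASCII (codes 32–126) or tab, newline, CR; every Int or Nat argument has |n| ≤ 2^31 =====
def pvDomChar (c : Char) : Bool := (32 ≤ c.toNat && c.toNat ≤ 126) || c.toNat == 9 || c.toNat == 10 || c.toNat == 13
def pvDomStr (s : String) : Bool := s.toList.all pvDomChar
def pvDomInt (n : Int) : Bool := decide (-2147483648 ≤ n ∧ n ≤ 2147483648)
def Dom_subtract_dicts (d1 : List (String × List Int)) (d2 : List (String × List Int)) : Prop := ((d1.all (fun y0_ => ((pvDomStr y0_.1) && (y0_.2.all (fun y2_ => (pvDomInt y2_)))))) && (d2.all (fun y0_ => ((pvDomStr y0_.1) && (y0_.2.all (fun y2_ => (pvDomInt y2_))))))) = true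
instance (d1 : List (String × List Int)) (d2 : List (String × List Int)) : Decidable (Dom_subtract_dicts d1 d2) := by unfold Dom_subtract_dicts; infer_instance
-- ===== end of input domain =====

-- B replaces A's repeated list.remove scans by a per-key removal counter and a one-pass rebuild;
-- A mutates d1's lists in place, B does not: only the RETURN value is claimed equal.


-- ===== PORT A =====
-- inner loop: for val in values: try: d1[key].remove(val) except ValueError: pass
def pyRemoveAll (lst : List Int) (vals : List Int) : List Int :=
  vals.foldl (fun l v => (PySem.List.remove? l v).getD l) lst

def subtract_dicts (d1 : List (String × List Int)) (d2 : List (String × List Int)) : List (String × List Int) :=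
  -- for key, values in d2.items(): if key not in d1: continue; <remove each val from d1[key]>,
  -- then d1 = {k: v for k, v in d1.items() if v}
  ((d2.foldl (fun d kv =>
      if d.contains kv.1 then d.modify kv.1 [] (fun l => pyRemoveAll l kv.2) else d)
    (PySem.Dict.mk d1)).items).filter (fun kv => !kv.2.isEmpty)

-- ===== PORT B =====
-- need = {}; for v in d2.get(key, []): need[v] = need.get(v, 0) + 1
def needOf (vals : List Int) : PySem.Dict Int Int :=
  vals.foldl (fun d v => d.insert v (d.getD v 0 + 1)) PySem.Dict.empty

-- kept = []; for x in lst: if need.get(x, 0) > 0: need[x] = need[x] - 1 else: kept.append(x)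
def keepScan (lst : List Int) (need0 : PySem.Dict Int Int) : List Int :=
  (lst.foldl (fun (s : PySem.Dict Int Int × List Int) x =>
      if s.1.getD x 0 > 0 then (s.1.insert x (s.1.getD x 0 - 1), s.2)
      else (s.1, s.2 ++ [x])) (need0, ([] : List Int))).2

def subtract_dicts_alt (d1 : List (String × List Int)) (d2 : List (String × List Int)) : List (String × List Int) :=
  -- result = {}; for key, lst in d1.items(): build need, rebuild kept; if kept: result[key] = kept
  (d1.foldl (fun (res : PySem.Dict String (List Int)) kv =>
      if (keepScan kv.2 (needOf ((PySem.Dict.mk d2).getD kv.1 []))).isEmpty then res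
      else res.insert kv.1 (keepScan kv.2 (needOf ((PySem.Dict.mk d2).getD kv.1 [])))) PySem.Dict.empty).items

-- ===== PRECONDITION & SPEC =====
-- Pre_ excludes association lists with duplicate keys: they do not represent any Python dict
-- (dict() collapses duplicates), so the ports' behaviour there is an artefact of the encoding.
def Pre_subtract_dicts (d1 : List (String × List Int)) (d2 : List (String × List Int)) : Prop :=
  (d1.map Prod.fst).Nodup ∧ (d2.map Prod.fst).Nodup
instance (d1 : List (String × List Int)) (d2 : List (String × List Int)) : Decidable (Pre_subtract_dicts d1 d2) := by unfold Pre_subtract_dicts; infer_instance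

def pvWitness_subtract_dicts : (List (String × List Int)) × (List (String × List Int)) :=
  ([("a", [1, 2, 1, 3]), ("b", [5])], [("a", [1, 1, 9]), ("c", [5])])

def Spec_subtract_dicts (d1 : List (String × List Int)) (d2 : List (String × List Int)) (out : List (String × List Int)) : Prop := out = subtract_dicts_alt d1 d2
instance (d1 : List (String × List Int)) (d2 : List (String × List Int)) (out : List (String × List Int)) : Decidable (Spec_subtract_dicts d1 d2 out) := by unfold Spec_subtract_dicts; infer_instance

-- ===== CLAIM (what is proved, stated in full; the proofs are below) =====
def Claim_equal_subtract_dicts : Prop := ∀ (d1 : List (String × List Int)) (d2 : List (String × List Int)), Dom_subtract_dicts d1 d2 → Pre_subtract_dicts d1 d2 → Spec_subtract_dicts d1 d2 (subtract_dicts d1 d2)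

-- ===== LEMMAS AND PROOFS =====

-- specification-level subtraction: walk the list once with a map of still-owed removal counts
def decAt (f : Int → Nat) (x : Int) : Int → Nat := fun v => if v = x then f x - 1 else f v
def bumpAt (f : Int → Nat) (w : Int) : Int → Nat := fun v => if v = w then f v + 1 else f v

def subSpec : List Int → (Int → Nat) → List Int
  | [], _ => []
  | x :: xs, f => if 0 < f x then subSpec xs (decAt f x) else x :: subSpec xs f

def removeOne (w : Int) (lst : List Int) : List Int := (PySem.List.remove? lst w).getD lst

lemma removeOne_cons_of_ne (x w : Int) (xs : List Int) (h : x ≠ w) :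
    removeOne w (x :: xs) = x :: removeOne w xs := by
  simp only [removeOne, PySem.List.remove?_cons_of_ne xs h]
  cases PySem.List.remove? xs w <;> simp

lemma subSpec_zero (lst : List Int) : subSpec lst (fun _ => 0) = lst := by
  induction lst with
  | nil => rfl
  | cons x xs ih => simp [subSpec, ih]

lemma subSpec_bump (lst : List Int) (f : Int → Nat) (w : Int) :
    subSpec lst (bumpAt f w) = subSpec (removeOne w lst) f := by
  induction lst generalizing f with
  | nil => simp [removeOne, PySem.List.remove?, subSpec]
  | cons x xs ih =>
    by_cases hxw : x = w
    · subst hxw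
      have hrm : removeOne x (x :: xs) = xs := by
        simp [removeOne, PySem.List.remove?_cons_self]
      have hpos : 0 < bumpAt f x x := by simp [bumpAt]
      have hdec : decAt (bumpAt f x) x = f := by
        funext v
        by_cases hv : v = x <;> simp [decAt, bumpAt, hv]
      rw [hrm, subSpec, if_pos hpos, hdec]
    · rw [removeOne_cons_of_ne x w xs hxw]
      have hval : bumpAt f w x = f x := by simp [bumpAt, hxw]
      have hdec : decAt (bumpAt f w) x = bumpAt (decAt f x) w := by
        funext v
        by_cases hv : v = x
        · subst hv; simp [decAt, bumpAt, hxw]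
        · by_cases hvw : v = w <;> simp [decAt, bumpAt, hv, hvw, Ne.symm hxw]
      by_cases hfx : 0 < f x
      · rw [subSpec, hval, if_pos hfx, hdec, ih (decAt f x), subSpec, if_pos hfx]
      · rw [subSpec, hval, if_neg hfx, ih f, subSpec, if_neg hfx]

-- A's inner loop computes subSpec with the multiset of d2's values for this key
lemma pyRemoveAll_eq_subSpec (vals lst : List Int) :
    pyRemoveAll lst vals = subSpec lst (fun v => vals.count v) := by
  induction vals generalizing lst with
  | nil => simpa [pyRemoveAll] using (subSpec_zero lst).symm
  | cons v vs ih =>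
    have h1 : pyRemoveAll lst (v :: vs) = pyRemoveAll (removeOne v lst) vs := by
      simp [pyRemoveAll, removeOne]
    have h2 : (fun a => (v :: vs).count a) = bumpAt (fun a => vs.count a) v := by
      funext a
      by_cases hav : a = v
      · subst hav; simp [bumpAt]
      · have hva : v ≠ a := fun h => hav h.symm
        simp [bumpAt, hav, hva]
    rw [h1, ih, h2, subSpec_bump lst (fun a => vs.count a) v]

-- B's inner loop computes subSpec too (invariant: the dict realises f pointwise)
lemma keepScan_loop (lst : List Int) (d : PySem.Dict Int Int) (f : Int → Nat) (acc : List Int)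
    (hd : ∀ v, d.getD v 0 = (f v : Int)) :
    (lst.foldl (fun (s : PySem.Dict Int Int × List Int) x =>
      if s.1.getD x 0 > 0 then (s.1.insert x (s.1.getD x 0 - 1), s.2)
      else (s.1, s.2 ++ [x])) (d, acc)).2 = acc ++ subSpec lst f := by
  induction lst generalizing d f acc with
  | nil => simp [subSpec]
  | cons x xs ih =>
    simp only [List.foldl_cons, subSpec]
    by_cases hfx : 0 < f x
    · have hx : d.getD x 0 > 0 := by rw [hd x]; exact_mod_cast hfx
      rw [if_pos hx, if_pos hfx]
      exact ih (d.insert x (d.getD x 0 - 1)) (decAt f x) acc (by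
        intro v
        rw [PySem.Dict.getD_insert]
        by_cases hv : v = x
        · subst hv
          rw [if_pos rfl, hd v, show decAt f v v = f v - 1 by simp [decAt]]
          omega
        · rw [if_neg hv]
          simp [decAt, hv, hd v])
    · have hx : ¬ d.getD x 0 > 0 := by rw [hd x]; exact_mod_cast hfx
      rw [if_neg hx, if_neg hfx, ih d f (acc ++ [x]) hd]
      simp

lemma keepScan_eq_subSpec (lst vals : List Int) :
    keepScan lst (needOf vals) = subSpec lst (fun v => vals.count v) := by
  have hneed : ∀ v, (needOf vals).getD v 0 = ((vals.count v : Nat) : Int) := by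
    intro v
    rw [needOf, PySem.Dict.foldl_insert_getD_add_one_eq_counter, PySem.Dict.getD_counter]
  unfold keepScan
  rw [keepScan_loop lst (needOf vals) (fun v => vals.count v) [] hneed]
  simp

-- the two inner computations agree on every key's list
lemma inner_eq (l : List Int) (vals : List Int) :
    pyRemoveAll l vals = keepScan l (needOf vals) := by
  rw [pyRemoveAll_eq_subSpec, keepScan_eq_subSpec]

-- A's fold over d2 leaves keys unchanged
lemma foldA_keys (d2 : List (String × List Int)) (D : PySem.Dict String (List Int)) :
    (d2.foldl (fun d kv =>
        if d.contains kv.1 then d.modify kv.1 [] (fun l => pyRemoveAll l kv.2) else d) D).keys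
      = D.keys := by
  induction d2 generalizing D with
  | nil => rfl
  | cons p rest ih =>
    rw [List.foldl_cons, ih]
    by_cases hc : D.contains p.1 = true
    · rw [if_pos hc, PySem.Dict.keys_modify, PySem.Dict.keys_insert_of_contains _ _ hc]
    · rw [if_neg hc]

-- A's fold over d2, read back pointwise
lemma foldA_getD (d2 : List (String × List Int)) (D : PySem.Dict String (List Int))
    (hnd2 : (d2.map Prod.fst).Nodup) (k : String) :
    (d2.foldl (fun d kv =>
        if d.contains kv.1 then d.modify kv.1 [] (fun l => pyRemoveAll l kv.2) else d) D).getD k []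
    = if D.contains k then pyRemoveAll (D.getD k []) ((PySem.Dict.mk d2).getD k []) else D.getD k [] := by
  induction d2 generalizing D with
  | nil =>
    simp only [List.foldl_nil]
    split
    · have : (PySem.Dict.mk ([] : List (String × List Int))).getD k [] = [] := rfl
      rw [this]; rfl
    · rfl
  | cons p rest ih =>
    obtain ⟨k0, v0⟩ := p
    simp only [List.map_cons, List.nodup_cons] at hnd2
    obtain ⟨hk0, hrest⟩ := hnd2
    rw [List.foldl_cons]
    have hmkne : ∀ (hkk : k ≠ k0), (PySem.Dict.mk ((k0, v0) :: rest)).getD k [] = (PySem.Dict.mk rest).getD k [] := by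
      intro hkk
      simp only [PySem.Dict.getD_eq_get?_getD, PySem.Dict.get?_mk_cons]
      rw [if_neg (by simpa using fun h => hkk h.symm)]
    by_cases hck0 : D.contains k0 = true
    · rw [if_pos hck0]
      set D' := D.modify k0 [] (fun l => pyRemoveAll l v0) with hD'
      have hcont : ∀ k', D'.contains k' = D.contains k' := by
        intro k'
        rw [hD', PySem.Dict.contains_modify]
        by_cases hk' : k' = k0
        · subst hk'; simp [hck0]
        · simp [hk']
      rw [ih D' hrest, hcont k]
      by_cases hc : D.contains k = true
      · rw [if_pos hc, if_pos hc]
        by_cases hkk : k = k0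
        · subst hkk
          have h1 : D'.getD k [] = pyRemoveAll (D.getD k []) v0 := by
            rw [hD', PySem.Dict.getD_modify, if_pos rfl]
          have h2 : (PySem.Dict.mk rest).getD k [] = [] := by
            simp only [PySem.Dict.getD_eq_get?_getD]
            rw [(PySem.Dict.get?_eq_none_iff_not_mem_keys _ _).2 (by rwa [PySem.Dict.keys_mk])]
            rfl
          have h3 : (PySem.Dict.mk ((k, v0) :: rest)).getD k [] = v0 := by
            simp only [PySem.Dict.getD_eq_get?_getD, PySem.Dict.get?_mk_cons]
            rw [if_pos (by simp)]
            rfl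
          rw [h1, h2, h3]
          simp [pyRemoveAll]
        · have h1 : D'.getD k [] = D.getD k [] := by
            rw [hD', PySem.Dict.getD_modify, if_neg hkk]
          rw [h1, hmkne hkk]
      · rw [if_neg hc, if_neg hc]
        have hkk : k ≠ k0 := fun h => hc (h ▸ hck0)
        rw [hD', PySem.Dict.getD_modify, if_neg hkk]
    · rw [if_neg hck0, ih D hrest]
      by_cases hc : D.contains k = true
      · rw [if_pos hc, if_pos hc]
        have hkk : k ≠ k0 := fun h => hck0 (h ▸ hc)
        rw [hmkne hkk]
      · rw [if_neg hc, if_neg hc]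

-- B's fold over d1 appends exactly the nonempty rebuilt entries
lemma foldB_items (d2 : List (String × List Int)) (d1 : List (String × List Int))
    (res : PySem.Dict String (List Int))
    (hnd1 : (d1.map Prod.fst).Nodup) (hfresh : ∀ kv ∈ d1, res.contains kv.1 = false) :
    (d1.foldl (fun (res : PySem.Dict String (List Int)) kv =>
        let kept := keepScan kv.2 (needOf ((PySem.Dict.mk d2).getD kv.1 []))
        if kept.isEmpty then res else res.insert kv.1 kept) res).items
    = res.items ++ (d1.map (fun kv => (kv.1, keepScan kv.2 (needOf ((PySem.Dict.mk d2).getD kv.1 []))))).filter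
        (fun kv => !kv.2.isEmpty) := by
  induction d1 generalizing res with
  | nil => simp
  | cons kv rest ih =>
    simp only [List.map_cons, List.nodup_cons] at hnd1
    obtain ⟨hkv, hrest⟩ := hnd1
    rw [List.foldl_cons]
    set kept := keepScan kv.2 (needOf ((PySem.Dict.mk d2).getD kv.1 [])) with hkept
    by_cases hemp : kept.isEmpty
    · simp only [hemp, if_pos]
      rw [ih res hrest (fun kv' h => hfresh kv' (List.mem_cons_of_mem _ h)),
        List.map_cons, List.filter_cons_of_neg (by rw [← hkept]; simp [hemp])]
    · simp only [hemp]
      rw [if_neg (by simp)]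
      rw [ih (res.insert kv.1 kept) hrest (by
        intro kv' h
        rw [PySem.Dict.contains_insert]
        have hne : kv'.1 ≠ kv.1 := by
          intro heq
          exact hkv (heq ▸ List.mem_map_of_mem h)
        simp [hne, hfresh kv' (List.mem_cons_of_mem _ h)])]
      rw [PySem.Dict.items_insert_of_not_contains _ _ (hfresh kv (List.mem_cons_self))]
      simp [← hkept, hemp]

-- ===== VERDICT (by name: the statement is the Claim_ definition above) =====
theorem subtract_dicts_spec : Claim_equal_subtract_dicts := by
  intro d1 d2 _ hpre
  obtain ⟨h1, h2⟩ := hpre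
  unfold Spec_subtract_dicts subtract_dicts subtract_dicts_alt
  set F := d2.foldl (fun (d : PySem.Dict String (List Int)) kv =>
      if d.contains kv.1 then d.modify kv.1 [] (fun l => pyRemoveAll l kv.2) else d)
      (PySem.Dict.mk d1) with hF
  have hkeysF : F.keys = d1.map Prod.fst := by
    rw [hF, foldA_keys, PySem.Dict.keys_mk]
  have hndF : F.keys.Nodup := by rw [hkeysF]; exact h1
  have hitems : F.items = d1.map (fun kv =>
      (kv.1, pyRemoveAll kv.2 ((PySem.Dict.mk d2).getD kv.1 []))) := by
    rw [PySem.Dict.items_eq_map_keys F hndF [], hkeysF, List.map_map]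
    apply List.map_congr_left
    intro kv hkv
    have hc : (PySem.Dict.mk d1).contains kv.1 = true := by
      rw [PySem.Dict.contains_eq_decide_mem_keys, PySem.Dict.keys_mk]
      simp only [decide_eq_true_eq]
      exact List.mem_map_of_mem hkv
    have hg : (PySem.Dict.mk d1).getD kv.1 [] = kv.2 := by
      apply PySem.Dict.getD_of_mem_items
      · show (kv.1, kv.2) ∈ d1
        simpa using hkv
      · rw [PySem.Dict.keys_mk]; exact h1
    have hpt := foldA_getD d2 (PySem.Dict.mk d1) h2 kv.1
    rw [← hF] at hpt
    simp only [Function.comp_apply]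
    rw [hpt, if_pos hc, hg]
  have hmapeq : d1.map (fun kv => (kv.1, pyRemoveAll kv.2 ((PySem.Dict.mk d2).getD kv.1 [])))
      = d1.map (fun kv => (kv.1, keepScan kv.2 (needOf ((PySem.Dict.mk d2).getD kv.1 [])))) :=
    List.map_congr_left (fun kv _ => by rw [inner_eq])
  have hBitems := foldB_items d2 d1 PySem.Dict.empty h1 (fun kv _ => PySem.Dict.contains_empty _)
  have hempty : (PySem.Dict.empty : PySem.Dict String (List Int)).items = [] := rfl
  rw [hitems, hmapeq]
  rw [hBitems, hempty, List.nil_append]
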